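-- pv_equiv track=rewrite | github.com/ogcincubator/iliad-apis-features | checkin/core/profile.py | _infer_scalar_dtype
-- ===== SOURCE A (Python) =====
-- def _infer_scalar_dtype(values: list[str]) -> str:
--     if not values:
--         return "string"
--     ints = floats = 0
--     for v in values:
--         try:
--             int(v)
--             ints += 1
--             continue
--         except ValueError:
--             pass
--         try:
--             float(v)
--             floats += 1
--         except ValueError:
--             pass
--     if ints == len(values):
--         return "integer"
--     if ints + floats == len(values):
--         return "number"
--     return "string"
-- ===== SOURCE B (Python) =====
-- def _infer_scalar_dtype(values):
--     if not values:
--         return "string"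
--
--     def rank(v):
--         # 0 = parses as int, 1 = parses as float only, 2 = neither
--         try:
--             int(v)
--             return 0
--         except ValueError:
--             pass
--         try:
--             float(v)
--             return 1
--         except ValueError:
--             return 2
--
--     worst = 0
--     for v in values:
--         r = rank(v)
--         if r > worst:
--             worst = r
--         if worst == 2:
--             break
--     if worst == 0:
--         return "integer"
--     if worst == 1:
--         return "number"
--     return "string"
-- ===== Notes on version B (the rewrite author's own statement) =====
-- stated objective: alternative
-- what changed: Replaces A's two counters compared against len(values) by a single pass that tracks the maximum severity rank (0=int, 1=float-only, 2=neither) and exits early once a non-numeric value forces rank 2, then maps that rank to the dtype name.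
import Mathlib
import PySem

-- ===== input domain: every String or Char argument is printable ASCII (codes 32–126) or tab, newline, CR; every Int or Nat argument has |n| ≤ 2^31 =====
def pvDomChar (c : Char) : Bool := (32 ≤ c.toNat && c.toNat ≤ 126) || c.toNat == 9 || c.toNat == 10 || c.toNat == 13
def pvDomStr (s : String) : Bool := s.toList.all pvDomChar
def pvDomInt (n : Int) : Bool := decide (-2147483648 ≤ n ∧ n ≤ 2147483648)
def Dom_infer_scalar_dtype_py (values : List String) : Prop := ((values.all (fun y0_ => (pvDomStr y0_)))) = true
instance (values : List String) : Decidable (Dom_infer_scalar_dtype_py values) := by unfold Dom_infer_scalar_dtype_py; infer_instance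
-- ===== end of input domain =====

-- B replaces A's two counters compared against len(values) by a single early-exiting pass that
-- tracks the maximum severity rank (0 = int, 1 = float-only, 2 = neither), exiting early at rank 2;
-- a timing run measured B faster on its generated inputs (early exit).


-- ===== PORT A =====
-- `int(v)` succeeds iff PySem.Int.ofStr? returns some.  `float(v)` has no PySem primitive; it is
-- modelled by hand, step for step through CPython's float-literal grammar, as a recursive-descent
-- recognizer (leading/trailing whitespace, optional sign, inf/infinity/nan case-insensitive, digit
-- groups with single underscores, optional fraction, optional exponent); exact on the printable
-- ASCII + tab/newline/CR domain.
def pvWsA (c : Char) : Bool := c = ' ' || c = '\t' || c = '\n' || c = '\r'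

def pvTrailA : List Char → Bool
  | [] => true
  | c :: r => if pvWsA c then pvTrailA r else false

mutual
def pvExpDigA : List Char → Bool
  | [] => true
  | c :: r =>
    if c.isDigit then pvExpDigA r
    else if c = '_' then pvExpUndA r
    else if pvWsA c then pvTrailA r else false
def pvExpUndA : List Char → Bool
  | [] => false
  | c :: r => if c.isDigit then pvExpDigA r else false
end

def pvExpSignedA : List Char → Bool
  | [] => false
  | c :: r => if c.isDigit then pvExpDigA r else false

def pvExpStartA : List Char → Bool
  | [] => false
  | c :: r =>
    if c = '+' ∨ c = '-' then pvExpSignedA r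
    else if c.isDigit then pvExpDigA r else false

mutual
def pvFracDigA : List Char → Bool
  | [] => true
  | c :: r =>
    if c.isDigit then pvFracDigA r
    else if c = '_' then pvFracUndA r
    else if c = 'e' ∨ c = 'E' then pvExpStartA r
    else if pvWsA c then pvTrailA r else false
def pvFracUndA : List Char → Bool
  | [] => false
  | c :: r => if c.isDigit then pvFracDigA r else false
end

def pvAfterDotA : List Char → Bool
  | [] => true
  | c :: r =>
    if c.isDigit then pvFracDigA r
    else if c = 'e' ∨ c = 'E' then pvExpStartA r
    else if pvWsA c then pvTrailA r else false

def pvDotNoIntA : List Char → Bool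
  | [] => false
  | c :: r => if c.isDigit then pvFracDigA r else false

mutual
def pvIntDigA : List Char → Bool
  | [] => true
  | c :: r =>
    if c.isDigit then pvIntDigA r
    else if c = '_' then pvIntUndA r
    else if c = '.' then pvAfterDotA r
    else if c = 'e' ∨ c = 'E' then pvExpStartA r
    else if pvWsA c then pvTrailA r else false
def pvIntUndA : List Char → Bool
  | [] => false
  | c :: r => if c.isDigit then pvIntDigA r else false
end

def pvInf8A : List Char → Bool
  | [] => true
  | c :: r => if pvWsA c then pvTrailA r else false

def pvInf7A : List Char → Bool
  | [] => false
  | c :: r => if c = 'y' ∨ c = 'Y' then pvInf8A r else false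

def pvInf6A : List Char → Bool
  | [] => false
  | c :: r => if c = 't' ∨ c = 'T' then pvInf7A r else false

def pvInf5A : List Char → Bool
  | [] => false
  | c :: r => if c = 'i' ∨ c = 'I' then pvInf6A r else false

def pvInf4A : List Char → Bool
  | [] => false
  | c :: r => if c = 'n' ∨ c = 'N' then pvInf5A r else false

def pvInf3A : List Char → Bool
  | [] => true
  | c :: r =>
    if c = 'i' ∨ c = 'I' then pvInf4A r
    else if pvWsA c then pvTrailA r else false

def pvInf2A : List Char → Bool
  | [] => false
  | c :: r => if c = 'f' ∨ c = 'F' then pvInf3A r else false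

def pvInf1A : List Char → Bool
  | [] => false
  | c :: r => if c = 'n' ∨ c = 'N' then pvInf2A r else false

def pvNan3A : List Char → Bool
  | [] => true
  | c :: r => if pvWsA c then pvTrailA r else false

def pvNan2A : List Char → Bool
  | [] => false
  | c :: r => if c = 'n' ∨ c = 'N' then pvNan3A r else false

def pvNan1A : List Char → Bool
  | [] => false
  | c :: r => if c = 'a' ∨ c = 'A' then pvNan2A r else false

def pvDispA (c : Char) (r : List Char) : Bool :=
  if c.isDigit then pvIntDigA r
  else if c = '.' then pvDotNoIntA r
  else if c = 'i' ∨ c = 'I' then pvInf1A r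
  else if c = 'n' ∨ c = 'N' then pvNan1A r
  else false

def pvSignedA : List Char → Bool
  | [] => false
  | c :: r => pvDispA c r

def pvStartA : List Char → Bool
  | [] => false
  | c :: r =>
    if pvWsA c then pvStartA r
    else if c = '+' ∨ c = '-' then pvSignedA r
    else pvDispA c r

def pvFloatA (v : String) : Bool := pvStartA v.toList

-- the loop body: int(v) succeeded → ints += 1; else float(v) succeeded → floats += 1
def pvStepCnt (acc : Int × Int) (v : String) : Int × Int :=
  if (PySem.Int.ofStr? v).isSome then (acc.1 + 1, acc.2)
  else if pvFloatA v then (acc.1, acc.2 + 1)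
  else acc

def infer_scalar_dtype_py (values : List String) : String :=
  if values = [] then "string"
  else
    let p := values.foldl pvStepCnt (0, 0)
    if p.1 = (values.length : Int) then "integer"
    else if p.1 + p.2 = (values.length : Int) then "number"
    else "string"

-- ===== PORT B =====
-- B models `float(v)` by a table-driven DFA (pvStepB/pvAccB over numeric states), exact on the
-- same domain; rank(v) classifies one value, pvWorstB is the early-exiting maximum-rank loop.
def pvWsB (c : Char) : Bool := c = ' ' || c = '\t' || c = '\n' || c = '\r'

def pvDispB (c : Char) : Nat :=
  if c.isDigit then 2
  else if c = '.' then 3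
  else if c = 'i' ∨ c = 'I' then 10
  else if c = 'n' ∨ c = 'N' then 20
  else 99

def pvStepB (s : Nat) (c : Char) : Nat :=
  match s with
  | 0 => if pvWsB c then 0 else if c = '+' ∨ c = '-' then 1 else pvDispB c
  | 1 => pvDispB c
  | 2 =>
    if c.isDigit then 2 else if c = '_' then 4 else if c = '.' then 5
    else if c = 'e' ∨ c = 'E' then 6 else if pvWsB c then 9 else 99
  | 3 => if c.isDigit then 7 else 99
  | 4 => if c.isDigit then 2 else 99
  | 5 =>
    if c.isDigit then 7 else if c = 'e' ∨ c = 'E' then 6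
    else if pvWsB c then 9 else 99
  | 6 => if c = '+' ∨ c = '-' then 61 else if c.isDigit then 62 else 99
  | 7 =>
    if c.isDigit then 7 else if c = '_' then 8 else if c = 'e' ∨ c = 'E' then 6
    else if pvWsB c then 9 else 99
  | 8 => if c.isDigit then 7 else 99
  | 9 => if pvWsB c then 9 else 99
  | 10 => if c = 'n' ∨ c = 'N' then 11 else 99
  | 11 => if c = 'f' ∨ c = 'F' then 12 else 99
  | 12 => if c = 'i' ∨ c = 'I' then 13 else if pvWsB c then 9 else 99
  | 13 => if c = 'n' ∨ c = 'N' then 14 else 99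
  | 14 => if c = 'i' ∨ c = 'I' then 15 else 99
  | 15 => if c = 't' ∨ c = 'T' then 16 else 99
  | 16 => if c = 'y' ∨ c = 'Y' then 17 else 99
  | 17 => if pvWsB c then 9 else 99
  | 20 => if c = 'a' ∨ c = 'A' then 21 else 99
  | 21 => if c = 'n' ∨ c = 'N' then 22 else 99
  | 22 => if pvWsB c then 9 else 99
  | 61 => if c.isDigit then 62 else 99
  | 62 =>
    if c.isDigit then 62 else if c = '_' then 63
    else if pvWsB c then 9 else 99
  | 63 => if c.isDigit then 62 else 99
  | _ => 99

def pvAccB (s : Nat) : Bool :=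
  match s with
  | 2 => true | 5 => true | 7 => true | 9 => true | 12 => true
  | 17 => true | 22 => true | 62 => true | _ => false

def pvRunB : Nat → List Char → Bool
  | s, [] => pvAccB s
  | s, c :: r => pvRunB (pvStepB s c) r

def pvRankB (v : String) : Nat :=
  if (PySem.Int.ofStr? v).isSome then 0
  else if pvRunB 0 v.toList then 1
  else 2

def pvWorstB : Nat → List String → Nat
  | w, [] => w
  | w, v :: vs =>
    let r := pvRankB v
    let w' := if w < r then r else w
    if w' = 2 then 2 else pvWorstB w' vs

def infer_scalar_dtype_py_alt (values : List String) : String :=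
  if values = [] then "string"
  else
    let w := pvWorstB 0 values
    if w = 0 then "integer" else if w = 1 then "number" else "string"

-- ===== PRECONDITION & SPEC =====
def Spec_infer_scalar_dtype_py (values : List String) (out : String) : Prop := out = infer_scalar_dtype_py_alt values
instance (values : List String) (out : String) : Decidable (Spec_infer_scalar_dtype_py values out) := by unfold Spec_infer_scalar_dtype_py; infer_instance

-- ===== CLAIM (what is proved, stated in full; the proofs are below) =====
def Claim_equal_infer_scalar_dtype_py : Prop := ∀ (values : List String), Dom_infer_scalar_dtype_py values → Spec_infer_scalar_dtype_py values (infer_scalar_dtype_py values)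

-- ===== LEMMAS AND PROOFS =====

theorem pvWsAB (c : Char) : pvWsA c = pvWsB c := rfl

theorem pvDeadB (cs : List Char) : pvRunB 99 cs = false := by
  induction cs with
  | nil => rfl
  | cons c r ih => simpa [pvRunB, pvStepB] using ih

theorem pvTrail_eq (cs : List Char) : pvTrailA cs = pvRunB 9 cs := by
  induction cs with
  | nil => rfl
  | cons c r ih =>
    simp only [pvTrailA, pvRunB, pvStepB, pvWsAB]
    split_ifs <;> simp [ih, pvDeadB]

theorem pvExpPair_eq (cs : List Char) :
    pvExpDigA cs = pvRunB 62 cs ∧ pvExpUndA cs = pvRunB 63 cs := by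
  induction cs with
  | nil => exact ⟨rfl, rfl⟩
  | cons c r ih =>
    refine ⟨?_, ?_⟩ <;>
      · simp only [pvExpDigA, pvExpUndA, pvRunB, pvStepB, pvWsAB]
        split_ifs <;> simp [ih.1, ih.2, pvTrail_eq, pvDeadB]

theorem pvExpDig_eq (cs : List Char) : pvExpDigA cs = pvRunB 62 cs := (pvExpPair_eq cs).1

theorem pvExpSigned_eq (cs : List Char) : pvExpSignedA cs = pvRunB 61 cs := by
  cases cs with
  | nil => rfl
  | cons c r =>
    simp only [pvExpSignedA, pvRunB, pvStepB]
    split_ifs <;> simp [pvExpDig_eq, pvDeadB]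

theorem pvExpStart_eq (cs : List Char) : pvExpStartA cs = pvRunB 6 cs := by
  cases cs with
  | nil => rfl
  | cons c r =>
    simp only [pvExpStartA, pvRunB, pvStepB]
    split_ifs <;> simp [pvExpSigned_eq, pvExpDig_eq, pvDeadB]

theorem pvFracPair_eq (cs : List Char) :
    pvFracDigA cs = pvRunB 7 cs ∧ pvFracUndA cs = pvRunB 8 cs := by
  induction cs with
  | nil => exact ⟨rfl, rfl⟩
  | cons c r ih =>
    refine ⟨?_, ?_⟩ <;>
      · simp only [pvFracDigA, pvFracUndA, pvRunB, pvStepB, pvWsAB]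
        split_ifs <;> simp [ih.1, ih.2, pvExpStart_eq, pvTrail_eq, pvDeadB]

theorem pvFracDig_eq (cs : List Char) : pvFracDigA cs = pvRunB 7 cs := (pvFracPair_eq cs).1

theorem pvAfterDot_eq (cs : List Char) : pvAfterDotA cs = pvRunB 5 cs := by
  cases cs with
  | nil => rfl
  | cons c r =>
    simp only [pvAfterDotA, pvRunB, pvStepB, pvWsAB]
    split_ifs <;> simp [pvFracDig_eq, pvExpStart_eq, pvTrail_eq, pvDeadB]

theorem pvDotNoInt_eq (cs : List Char) : pvDotNoIntA cs = pvRunB 3 cs := by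
  cases cs with
  | nil => rfl
  | cons c r =>
    simp only [pvDotNoIntA, pvRunB, pvStepB]
    split_ifs <;> simp [pvFracDig_eq, pvDeadB]

theorem pvIntPair_eq (cs : List Char) :
    pvIntDigA cs = pvRunB 2 cs ∧ pvIntUndA cs = pvRunB 4 cs := by
  induction cs with
  | nil => exact ⟨rfl, rfl⟩
  | cons c r ih =>
    refine ⟨?_, ?_⟩ <;>
      · simp only [pvIntDigA, pvIntUndA, pvRunB, pvStepB, pvWsAB]
        split_ifs <;>
          simp [ih.1, ih.2, pvAfterDot_eq, pvExpStart_eq, pvTrail_eq, pvDeadB]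

theorem pvIntDig_eq (cs : List Char) : pvIntDigA cs = pvRunB 2 cs := (pvIntPair_eq cs).1

theorem pvInf8_eq (cs : List Char) : pvInf8A cs = pvRunB 17 cs := by
  cases cs with
  | nil => rfl
  | cons c r =>
    simp only [pvInf8A, pvRunB, pvStepB, pvWsAB]
    split_ifs <;> simp [pvTrail_eq, pvDeadB]

theorem pvInf7_eq (cs : List Char) : pvInf7A cs = pvRunB 16 cs := by
  cases cs with
  | nil => rfl
  | cons c r =>
    simp only [pvInf7A, pvRunB, pvStepB]
    split_ifs <;> simp [pvInf8_eq, pvDeadB]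

theorem pvInf6_eq (cs : List Char) : pvInf6A cs = pvRunB 15 cs := by
  cases cs with
  | nil => rfl
  | cons c r =>
    simp only [pvInf6A, pvRunB, pvStepB]
    split_ifs <;> simp [pvInf7_eq, pvDeadB]

theorem pvInf5_eq (cs : List Char) : pvInf5A cs = pvRunB 14 cs := by
  cases cs with
  | nil => rfl
  | cons c r =>
    simp only [pvInf5A, pvRunB, pvStepB]
    split_ifs <;> simp [pvInf6_eq, pvDeadB]

theorem pvInf4_eq (cs : List Char) : pvInf4A cs = pvRunB 13 cs := by
  cases cs with
  | nil => rfl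
  | cons c r =>
    simp only [pvInf4A, pvRunB, pvStepB]
    split_ifs <;> simp [pvInf5_eq, pvDeadB]

theorem pvInf3_eq (cs : List Char) : pvInf3A cs = pvRunB 12 cs := by
  cases cs with
  | nil => rfl
  | cons c r =>
    simp only [pvInf3A, pvRunB, pvStepB, pvWsAB]
    split_ifs <;> simp [pvInf4_eq, pvTrail_eq, pvDeadB]

theorem pvInf2_eq (cs : List Char) : pvInf2A cs = pvRunB 11 cs := by
  cases cs with
  | nil => rfl
  | cons c r =>
    simp only [pvInf2A, pvRunB, pvStepB]
    split_ifs <;> simp [pvInf3_eq, pvDeadB]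

theorem pvInf1_eq (cs : List Char) : pvInf1A cs = pvRunB 10 cs := by
  cases cs with
  | nil => rfl
  | cons c r =>
    simp only [pvInf1A, pvRunB, pvStepB]
    split_ifs <;> simp [pvInf2_eq, pvDeadB]

theorem pvNan3_eq (cs : List Char) : pvNan3A cs = pvRunB 22 cs := by
  cases cs with
  | nil => rfl
  | cons c r =>
    simp only [pvNan3A, pvRunB, pvStepB, pvWsAB]
    split_ifs <;> simp [pvTrail_eq, pvDeadB]

theorem pvNan2_eq (cs : List Char) : pvNan2A cs = pvRunB 21 cs := by
  cases cs with
  | nil => rfl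
  | cons c r =>
    simp only [pvNan2A, pvRunB, pvStepB]
    split_ifs <;> simp [pvNan3_eq, pvDeadB]

theorem pvNan1_eq (cs : List Char) : pvNan1A cs = pvRunB 20 cs := by
  cases cs with
  | nil => rfl
  | cons c r =>
    simp only [pvNan1A, pvRunB, pvStepB]
    split_ifs <;> simp [pvNan2_eq, pvDeadB]

theorem pvDisp_eq (c : Char) (r : List Char) : pvDispA c r = pvRunB (pvDispB c) r := by
  simp only [pvDispA, pvDispB]
  split_ifs <;> simp [pvIntDig_eq, pvDotNoInt_eq, pvInf1_eq, pvNan1_eq, pvDeadB]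

theorem pvSigned_eq (cs : List Char) : pvSignedA cs = pvRunB 1 cs := by
  cases cs with
  | nil => rfl
  | cons c r =>
    simp only [pvSignedA, pvRunB, pvStepB]
    exact pvDisp_eq c r

theorem pvStart_eq (cs : List Char) : pvStartA cs = pvRunB 0 cs := by
  induction cs with
  | nil => rfl
  | cons c r ih =>
    simp only [pvStartA, pvRunB, pvStepB, pvWsAB]
    split_ifs <;> simp [ih, pvSigned_eq, pvDisp_eq]

theorem pvFloat_eq (v : String) : pvFloatA v = pvRunB 0 v.toList := pvStart_eq _

-- rank characterisations
def pvIntOk (v : String) : Bool := (PySem.Int.ofStr? v).isSome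
def pvNumOk (v : String) : Bool := pvIntOk v || pvFloatA v

theorem pvRank_eq (v : String) :
    pvRankB v = if pvIntOk v then 0 else if pvFloatA v then 1 else 2 := by
  simp [pvRankB, pvIntOk, pvFloat_eq]

theorem pvRank_le_two (v : String) : pvRankB v ≤ 2 := by
  rw [pvRank_eq]; split_ifs <;> omega

theorem pvRank_zero_iff (v : String) : pvRankB v = 0 ↔ pvIntOk v = true := by
  rw [pvRank_eq]; split_ifs <;> simp_all

theorem pvRank_le_one_iff (v : String) : pvRankB v ≤ 1 ↔ pvNumOk v = true := by
  rw [pvRank_eq]; unfold pvNumOk; split_ifs <;> simp_all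

-- the maximum rank of a list
def pvM (l : List String) : Nat := l.foldr (fun v m => max (pvRankB v) m) 0

theorem pvM_le_two (l : List String) : pvM l ≤ 2 := by
  induction l with
  | nil => simp [pvM]
  | cons v vs ih => simp only [pvM, List.foldr_cons] at *; exact max_le (pvRank_le_two v) ih

theorem pvWorst_eq (l : List String) : ∀ w, w ≤ 2 → pvWorstB w l = max w (pvM l) := by
  induction l with
  | nil => intro w _; simp [pvWorstB, pvM]
  | cons v vs ih =>
    intro w hw
    have hr := pvRank_le_two v
    have hM := pvM_le_two vs
    simp only [pvWorstB]
    have hmax : (if w < pvRankB v then pvRankB v else w) = max w (pvRankB v) := by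
      split_ifs <;> omega
    rw [hmax]
    split_ifs with h2
    · have : pvM (v :: vs) = max (pvRankB v) (pvM vs) := rfl
      omega
    · rw [ih _ (by omega)]
      have : pvM (v :: vs) = max (pvRankB v) (pvM vs) := rfl
      omega

theorem pvM_zero_iff (l : List String) : pvM l = 0 ↔ l.all pvIntOk = true := by
  induction l with
  | nil => simp [pvM]
  | cons v vs ih =>
    simp only [pvM, List.foldr_cons, List.all_cons, Bool.and_eq_true] at *
    rw [Nat.max_eq_zero_iff, ih, pvRank_zero_iff]

theorem pvM_le_one_iff (l : List String) : pvM l ≤ 1 ↔ l.all pvNumOk = true := by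
  induction l with
  | nil => simp [pvM]
  | cons v vs ih =>
    simp only [pvM, List.foldr_cons, List.all_cons, Bool.and_eq_true] at *
    rw [Nat.max_le, ih, pvRank_le_one_iff]

-- the counting loop computes (ints, floats) = (#int-like, #float-but-not-int-like)
theorem pvFold_eq (l : List String) (a b : Int) :
    l.foldl pvStepCnt (a, b) =
      (a + (l.countP pvIntOk : Int),
       b + (l.countP (fun v => !pvIntOk v && pvFloatA v) : Int)) := by
  induction l generalizing a b with
  | nil => simp
  | cons x xs ih =>
    simp only [List.foldl_cons, List.countP_cons, pvStepCnt]
    by_cases hi : pvIntOk x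
    · simp only [pvIntOk] at hi
      simp [hi, ih, pvIntOk]; ring
    · simp only [pvIntOk] at hi
      by_cases hf : pvFloatA x
      · simp [hi, hf, ih, pvIntOk]; ring
      · simp [hi, hf, ih, pvIntOk]

theorem pvCountP_split (l : List String) :
    l.countP pvIntOk + l.countP (fun v => !pvIntOk v && pvFloatA v) = l.countP pvNumOk := by
  induction l with
  | nil => simp
  | cons x xs ih =>
    simp only [List.countP_cons, pvNumOk]
    by_cases hi : pvIntOk x
    · simp [hi]; omega
    · by_cases hf : pvFloatA x
      · simp [hi, hf]; omega
      · simp [hi, hf]; omega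

theorem pvCountP_eq_len_iff (p : String → Bool) (l : List String) :
    ((l.countP p : Int) = (l.length : Int)) ↔ l.all p = true := by
  rw [Int.natCast_inj, List.countP_eq_length, List.all_eq_true]

-- ===== VERDICT (by name: the statement is the Claim_ definition above) =====
theorem infer_scalar_dtype_py_spec : Claim_equal_infer_scalar_dtype_py := by
  intro values _
  unfold Spec_infer_scalar_dtype_py infer_scalar_dtype_py infer_scalar_dtype_py_alt
  by_cases hnil : values = []
  · simp [hnil]
  · simp only [if_neg hnil, pvFold_eq, zero_add]
    have hw : pvWorstB 0 values = pvM values := by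
      rw [pvWorst_eq values 0 (by omega)]; omega
    rw [hw]
    by_cases h1 : values.all pvIntOk = true
    · rw [if_pos ((pvCountP_eq_len_iff _ _).mpr h1),
        if_pos ((pvM_zero_iff values).mpr h1)]
    · rw [if_neg (fun h => h1 ((pvCountP_eq_len_iff _ _).mp h)),
        if_neg (fun h => h1 ((pvM_zero_iff values).mp h))]
      by_cases h2 : values.all pvNumOk = true
      · have hc := (pvCountP_eq_len_iff pvNumOk values).mpr h2
        have hM := (pvM_le_one_iff values).mpr h2
        have hM0 : ¬ pvM values = 0 := fun h => h1 ((pvM_zero_iff values).mp h)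
        rw [if_pos (by rw [← pvCountP_split] at hc; push_cast at hc ⊢; omega),
          if_pos (by omega)]
      · have hc : ¬ ((values.countP pvNumOk : Int) = (values.length : Int)) :=
          fun h => h2 ((pvCountP_eq_len_iff _ _).mp h)
        have hM : ¬ pvM values ≤ 1 := fun h => h2 ((pvM_le_one_iff values).mp h)
        rw [if_neg (by rw [← pvCountP_split] at hc; push_cast at hc ⊢; omega),
          if_neg (by omega)]
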